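-- pv_equiv track=rewrite | github.com/juliusstein77/propra_blockteil | encode.py | extype_count
-- ===== SOURCE A (Python) =====
-- def extype_count(lines):
--     experiments = {}
--     for line in lines:
--         line = line.split(',')
--         type = line[0];
--         if type not in experiments:
--             experiments[type] = 1
--         else:
--             experiments[type] += 1
--     return experiments
-- ===== SOURCE B (Python) =====
-- def extype_count(lines):
--     # Divide and conquer: count each half independently, then merge the two
--     # dicts (first-occurrence order is preserved: left keys keep their order,
--     # new right keys are appended in their order).
--     n = len(lines)
--     if n == 0:
--         return {}
--     if n == 1:
--         return {lines[0].split(',')[0]: 1}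
--     counts = extype_count(lines[:n // 2])
--     for t, c in extype_count(lines[n // 2:]).items():
--         counts[t] = counts.get(t, 0) + c
--     return counts
-- ===== Notes on version B (the rewrite author's own statement) =====
-- stated objective: alternative
-- what changed: Replaces A's single forward pass with dict increments by divide and conquer: recursively count each half of the list and merge the two count dicts.
import Mathlib
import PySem

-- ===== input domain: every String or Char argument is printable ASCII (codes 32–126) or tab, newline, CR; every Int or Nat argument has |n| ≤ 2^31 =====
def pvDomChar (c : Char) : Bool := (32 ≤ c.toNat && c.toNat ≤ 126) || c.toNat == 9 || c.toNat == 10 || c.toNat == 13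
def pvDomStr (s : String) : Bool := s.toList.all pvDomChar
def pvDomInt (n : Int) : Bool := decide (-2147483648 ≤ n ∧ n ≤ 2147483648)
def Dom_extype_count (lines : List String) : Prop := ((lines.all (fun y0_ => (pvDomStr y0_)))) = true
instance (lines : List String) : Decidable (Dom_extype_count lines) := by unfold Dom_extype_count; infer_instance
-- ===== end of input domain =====

-- B replaces A's single forward counting pass by divide and conquer: count each
-- half recursively, then merge the two dicts (alternative algorithm, not faster).

-- line.split(',')[0]: split? with sep "," is always some and nonempty, so [0] is headD
def pvFirstField (line : String) : String :=
  ((PySem.Str.split? line ",").getD []).headD ""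

-- ===== PORT A =====
def extype_count (lines : List String) : List (String × Int) :=
  (lines.foldl (fun d line =>
      let t := pvFirstField line
      if ¬ d.contains t then d.insert t 1 else d.insert t (d.getD t 0 + 1))
    PySem.Dict.empty).items

-- ===== PORT B =====
-- the recursive function of Source B, returning the dict; lines[0] is headD "" (exact:
-- that branch has length 1); lines[:n//2] and lines[n//2:] are PySem slices;
-- fuel (= initial length; each slice is strictly shorter) only makes the same
-- recursion structural, the 0-fuel branch is never reached
def extype_count_alt_core : Nat → List String → PySem.Dict String Int
  | 0, _ => PySem.Dict.empty
  | fuel + 1, lines =>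
    let n : Int := lines.length
    if n = 0 then PySem.Dict.empty
    else if n = 1 then PySem.Dict.empty.insert (pvFirstField (lines.headD "")) 1
    else
      let counts := extype_count_alt_core fuel (PySem.List.slice lines none (some (PySem.Int.floordiv n 2)))
      (extype_count_alt_core fuel (PySem.List.slice lines (some (PySem.Int.floordiv n 2)) none)).items.foldl
        (fun d p => d.insert p.1 (d.getD p.1 0 + p.2)) counts

def extype_count_alt (lines : List String) : List (String × Int) :=
  (extype_count_alt_core lines.length lines).items

-- ===== PRECONDITION & SPEC =====
def Spec_extype_count (lines : List String) (out : List (String × Int)) : Prop := out = extype_count_alt lines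
instance (lines : List String) (out : List (String × Int)) : Decidable (Spec_extype_count lines out) := by unfold Spec_extype_count; infer_instance

-- ===== CLAIM (what is proved, stated in full; the proofs are below) =====
def Claim_equal_extype_count : Prop := ∀ (lines : List String), Dom_extype_count lines → Spec_extype_count lines (extype_count lines)

-- ===== LEMMAS AND PROOFS =====

-- find? for self-equality: the first hit is the key itself
theorem pvFind_self (l : List String) (k : String) :
    List.find? (fun x => x == k) l = if k ∈ l then some k else none := by
  induction l with
  | nil => simp
  | cons a l ih =>
    by_cases h : a = k
    · subst h; simp
    · simp [beq_iff_eq, h, ih, List.mem_cons, Ne.symm h]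

-- getD on a dict whose items are l.map (fun x => (x, f x))
theorem pvGetD_mk_map (l : List String) (f : String → Int) (k : String) (d : Int) :
    (PySem.Dict.mk (l.map (fun x => (x, f x)))).getD k d = if k ∈ l then f k else d := by
  simp only [PySem.Dict.getD, PySem.Dict.get?, List.find?_map]
  have : ((fun p : String × Int => p.1 == k) ∘ fun x => (x, f x)) = fun x => x == k := rfl
  rw [this, pvFind_self]
  split <;> simp

-- A's loop body: on a fresh key getD is 0, so both branches insert getD + 1
theorem pvStep_eq : (fun (d : PySem.Dict String Int) line =>
    let t := pvFirstField line
    if ¬ d.contains t then d.insert t 1 else d.insert t (d.getD t 0 + 1))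
    = fun d line => d.insert (pvFirstField line) (d.getD (pvFirstField line) 0 + 1) := by
  funext d line
  by_cases h : d.contains (pvFirstField line) = true
  · simp [h]
  · simp only [Bool.not_eq_true] at h
    simp [h, PySem.Dict.getD_of_not_contains d 0 h]

-- the canonical value both ports reach: distinct first fields in first-occurrence
-- order, each with its count
def pvCanon (ts : List String) : List (String × Int) :=
  (PySem.Set.ofList ts).map (fun k => (k, (ts.count k : Int)))

-- filtering a Nodup list by equality with k
theorem pvFilter_eq_of_nodup (l : List String) (hl : l.Nodup) (k : String) :
    l.filter (fun x => x == k) = if k ∈ l then [k] else [] := by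
  induction l with
  | nil => simp
  | cons a l ih =>
    rcases List.nodup_cons.mp hl with ⟨ha, hl'⟩
    by_cases h : a = k
    · subst h
      simp [ih hl', ha]
    · simp [h, ih hl', List.mem_cons, Ne.symm h]

-- inserting key ↦ w into a dict of shape l.map (k, g k)
theorem pvInsert_mk_map (l : List String) (g : String → Int) (key : String) (w : Int) :
    ((PySem.Dict.mk (l.map (fun k => (k, g k)))).insert key w).items
      = (if key ∈ l then l else l ++ [key]).map
          (fun k => (k, if k = key then w else g k)) := by
  rw [PySem.Dict.items_insert]
  have hc : (PySem.Dict.mk (l.map (fun k => (k, g k)))).contains key = decide (key ∈ l) := by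
    by_cases hm : key ∈ l
    · simp [PySem.Dict.contains, List.any_map, Function.comp_def, hm]
    · simp [PySem.Dict.contains, List.any_map, Function.comp_def, hm]
      exact fun x hx e => hm (e ▸ hx)
  rw [hc]
  by_cases hm : key ∈ l
  · rw [if_pos (by simp [hm]), if_pos hm]
    show List.map _ (List.map _ l) = _
    rw [List.map_map]
    apply List.map_congr_left
    intro x _
    by_cases hx : x = key
    · subst hx; simp
    · simp [hx, beq_iff_eq]
  · rw [if_neg (by simp [hm]), if_neg hm, List.map_append]
    congr 1
    · apply List.map_congr_left
      intro x hx
      have : x ≠ key := fun h => hm (h ▸ hx)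
      simp [this]
    · simp

-- the merge loop over an arbitrary pair list, from a dict of shape l.map (k, g k)
theorem pvFold_merge (ps : List (String × Int)) :
    ∀ (l : List String) (g : String → Int), l.Nodup → (∀ k, k ∉ l → g k = 0) →
    (ps.foldl (fun d p => d.insert p.1 (d.getD p.1 0 + p.2))
        (PySem.Dict.mk (l.map (fun k => (k, g k))))).items
      = (PySem.Set.update l (ps.map Prod.fst)).map
          (fun k => (k, g k + ((ps.filter (fun p => p.1 == k)).map Prod.snd).sum)) := by
  induction ps with
  | nil =>
    intro l g _ _
    simp [PySem.Set.update]
  | cons p ps ih =>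
    intro l g hl hg
    rw [List.foldl_cons]
    have hget : (PySem.Dict.mk (l.map (fun k => (k, g k)))).getD p.1 0 = g p.1 := by
      rw [pvGetD_mk_map]
      split <;> rename_i h
      · rfl
      · exact (hg _ h).symm
    rw [hget]
    have hd : (PySem.Dict.mk (l.map (fun k => (k, g k)))).insert p.1 (g p.1 + p.2)
        = PySem.Dict.mk ((if p.1 ∈ l then l else l ++ [p.1]).map
            (fun k => (k, if k = p.1 then g p.1 + p.2 else g k))) :=
      congrArg PySem.Dict.mk (pvInsert_mk_map l g p.1 (g p.1 + p.2))
    have hnodup1 : (if p.1 ∈ l then l else l ++ [p.1]).Nodup := by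
      split <;> rename_i h
      · exact hl
      · simp [List.nodup_append, hl]
        exact fun a ha e => h (e ▸ ha)
    have hzero1 : ∀ k, k ∉ (if p.1 ∈ l then l else l ++ [p.1]) →
        (if k = p.1 then g p.1 + p.2 else g k) = 0 := by
      intro k hk
      split at hk <;> rename_i h
      · have hkl : k ∉ l := hk
        have : k ≠ p.1 := fun e => hkl (e ▸ h)
        simp [this, hg k hkl]
      · simp only [List.mem_append, List.mem_singleton, not_or] at hk
        simp [hk.2, hg k hk.1]
    rw [hd, ih _ _ hnodup1 hzero1]
    have hkeys : PySem.Set.update (if p.1 ∈ l then l else l ++ [p.1]) (ps.map Prod.fst)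
        = PySem.Set.update l ((p :: ps).map Prod.fst) := by
      rw [List.map_cons, PySem.Set.update_cons]
      congr 1
      rw [PySem.Set.add]
      by_cases h : p.1 ∈ l
      · simp [PySem.Set.contains_eq_listContains, h]
      · simp [PySem.Set.contains_eq_listContains, h]
    rw [hkeys]
    apply List.map_congr_left
    intro x _
    by_cases hx : x = p.1
    · subst hx
      simp only [List.filter_cons, BEq.rfl, if_true, List.map_cons, List.sum_cons]
      refine congrArg (Prod.mk _) ?_
      ring
    · have : ¬ (p.1 == x) = true := by simpa [beq_iff_eq] using Ne.symm hx
      simp [hx, this]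

-- ofList is idempotent
theorem pvOfList_idem (ys : List String) :
    PySem.Set.ofList (PySem.Set.ofList ys) = PySem.Set.ofList ys := by
  rw [← PySem.Set.update_nil_left,
    PySem.Set.update_eq_append_of_disjoint _ _ (PySem.Set.nodup_ofList ys) (by simp)]
  simp

-- merging the canonical dict of ys into the canonical dict of xs counts xs ++ ys
theorem pvMerge_canon (xs ys : List String) :
    ((pvCanon ys).foldl (fun d p => d.insert p.1 (d.getD p.1 0 + p.2))
        (PySem.Dict.mk (pvCanon xs))).items = pvCanon (xs ++ ys) := by
  have hz : ∀ k, k ∉ PySem.Set.ofList xs → ((xs.count k : Int)) = 0 := by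
    intro k hk
    have : k ∉ xs := fun h => hk ((PySem.Set.mem_ofList _ _).mpr h)
    simp [List.count_eq_zero_of_not_mem this]
  have h := pvFold_merge (pvCanon ys) (PySem.Set.ofList xs)
    (fun k => (xs.count k : Int)) (PySem.Set.nodup_ofList xs) hz
  rw [show PySem.Dict.mk (pvCanon xs)
      = PySem.Dict.mk ((PySem.Set.ofList xs).map (fun k => (k, (xs.count k : Int)))) from rfl, h]
  have hfst : (pvCanon ys).map Prod.fst = PySem.Set.ofList ys := by
    simp [pvCanon, List.map_map, Function.comp_def]
  have hkeys : PySem.Set.update (PySem.Set.ofList xs) ((pvCanon ys).map Prod.fst)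
      = PySem.Set.ofList (xs ++ ys) := by
    rw [hfst, PySem.Set.ofList_append, PySem.Set.update_eq_append_filter,
      PySem.Set.update_eq_append_filter, pvOfList_idem]
  rw [hkeys, pvCanon]
  apply List.map_congr_left
  intro x _
  have hfilter : (List.map (fun k => (k, (ys.count k : Int))) (PySem.Set.ofList ys)).filter
        (fun p => p.1 == x)
      = ((PySem.Set.ofList ys).filter (fun k => k == x)).map
          (fun k => (k, (ys.count k : Int))) := by
    rw [List.filter_map]
    rfl
  rw [hfilter, pvFilter_eq_of_nodup _ (PySem.Set.nodup_ofList ys)]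
  by_cases hm : x ∈ PySem.Set.ofList ys
  · simp [hm, List.count_append]
  · have : x ∉ ys := fun h => hm ((PySem.Set.mem_ofList _ _).mpr h)
    simp [hm, List.count_append, List.count_eq_zero_of_not_mem this]

-- B's recursion computes the canonical value (strong induction on the length)
theorem pvDC_canon : ∀ (n : Nat) (lines : List String), lines.length ≤ n →
    (extype_count_alt_core n lines).items = pvCanon (lines.map pvFirstField) := by
  intro n
  induction n with
  | zero =>
    intro lines h
    obtain rfl : lines = [] := List.eq_nil_of_length_eq_zero (Nat.le_zero.mp h)
    rfl
  | succ n ih =>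
    intro lines h
    rw [extype_count_alt_core]
    split <;> rename_i h0
    · obtain rfl : lines = [] := by
        have : lines.length = 0 := by exact_mod_cast h0
        exact List.eq_nil_of_length_eq_zero this
      rfl
    · split <;> rename_i h1
      · obtain ⟨a, rfl⟩ : ∃ a, lines = [a] := by
          apply List.length_eq_one_iff.mp
          exact_mod_cast h1
        simp [pvCanon, PySem.Set.ofList, PySem.Set.add, PySem.Set.empty,
          PySem.Dict.items_insert, PySem.Dict.empty]
      · have hlen2 : 2 ≤ lines.length := by omega
        have hfd : (PySem.Int.floordiv (lines.length : Int) 2).toNat = lines.length / 2 := by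
          rw [PySem.Int.floordiv, Int.fdiv_eq_ediv]; omega
        have hsl1 : PySem.List.slice lines none (some (PySem.Int.floordiv (lines.length : Int) 2))
            = lines.take (lines.length / 2) := by
          rw [PySem.List.slice_to _ (by rw [PySem.Int.floordiv, Int.fdiv_eq_ediv]; omega), hfd]
        have hsl2 : PySem.List.slice lines (some (PySem.Int.floordiv (lines.length : Int) 2)) none
            = lines.drop (lines.length / 2) := by
          rw [PySem.List.slice_from _ (by rw [PySem.Int.floordiv, Int.fdiv_eq_ediv]; omega), hfd]
        rw [hsl1, hsl2]
        have ih1 := ih (lines.take (lines.length / 2)) (by simp; omega)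
        have ih2 := ih (lines.drop (lines.length / 2)) (by simp; omega)
        have hmk1 : extype_count_alt_core n (lines.take (lines.length / 2))
            = PySem.Dict.mk (pvCanon ((lines.take (lines.length / 2)).map pvFirstField)) :=
          congrArg PySem.Dict.mk ih1
        rw [ih2, hmk1, pvMerge_canon, ← List.map_append, List.take_append_drop]

-- ===== VERDICT (by name: the statement is the Claim_ definition above) =====
theorem extype_count_spec : Claim_equal_extype_count := by
  intro lines _
  unfold Spec_extype_count extype_count extype_count_alt
  rw [pvStep_eq,
    ← List.foldl_map (f := pvFirstField)
      (g := fun (d : PySem.Dict String Int) t => d.insert t (d.getD t 0 + 1)),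
    PySem.Dict.foldl_insert_getD_add_one_eq_counter, PySem.Dict.items_counter,
    pvDC_canon lines.length lines le_rfl]
  rfl
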